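-- pv_equiv track=rewrite | github.com/doocs/leetcode | solution/3700-3799/3730.Maximum Calories Burnt from Jumps/Solution.py | maxCaloriesBurnt
-- ===== SOURCE A (Python) =====
-- def maxCaloriesBurnt(heights: list[int]) -> int:
--     heights.sort()
--     pre = 0
--     l, r = 0, len(heights) - 1
--     ans = 0
--     while l < r:
--         ans += (heights[r] - pre) ** 2
--         ans += (heights[l] - heights[r]) ** 2
--         pre = heights[l]
--         l, r = l + 1, r - 1
--     ans += (heights[r] - pre) ** 2
--     return ans
-- ===== SOURCE B (Python) =====
-- def maxCaloriesBurnt(heights: list[int]) -> int: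
--     heights.sort()
--     n = len(heights)
--     total = 2 * sum(x * x for x in heights) - heights[(n - 1) // 2] ** 2
--     cross = sum(heights[j] * heights[n - 1 - j] for j in range(n // 2))
--     cross += sum(heights[j] * heights[n - 2 - j] for j in range((n - 1) // 2))
--     return total - 2 * cross
-- ===== Notes on version B (the rewrite author's own statement) =====
-- stated objective: alternative
-- what changed: B replaces A's two-pointer loop over squared differences by the algebraic expansion of the telescoped sum: ans = 2*sum(x^2) - middle^2 - 2*(sum of the max/min cross products), computed with three independent index sums over the sorted list; no zigzag traversal or running 'previous' value exists in B. Pre_ excludes only the empty list, on which both programs raise IndexError.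
import Mathlib
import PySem

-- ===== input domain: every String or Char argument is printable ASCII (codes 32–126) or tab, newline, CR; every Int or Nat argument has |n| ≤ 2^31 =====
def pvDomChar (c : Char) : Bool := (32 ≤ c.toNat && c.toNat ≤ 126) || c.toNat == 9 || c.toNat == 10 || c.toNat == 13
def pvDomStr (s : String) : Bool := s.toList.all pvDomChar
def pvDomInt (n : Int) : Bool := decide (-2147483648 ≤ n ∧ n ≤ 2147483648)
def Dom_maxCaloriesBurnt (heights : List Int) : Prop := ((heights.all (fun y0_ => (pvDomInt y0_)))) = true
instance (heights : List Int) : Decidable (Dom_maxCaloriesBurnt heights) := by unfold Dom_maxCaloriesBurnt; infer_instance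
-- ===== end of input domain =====

-- B computes the answer by algebraically expanding the squared differences into
-- 2*sum of squares minus the middle square minus twice the cross products, with no
-- zigzag traversal (objective: alternative algorithm, same cost).
-- Both Pythons sort `heights` in place; the equivalence proved is about the return value.

-- ===== PORT A =====
-- A's while loop: state (pre, l, r, ans); terminates because r - l shrinks.
def pvLoopA (s : List Int) (pre l r ans : Int) : Int :=
  if l < r then
    pvLoopA s (PySem.List.pyGetD s l 0) (l + 1) (r - 1)
      (ans + (PySem.List.pyGetD s r 0 - pre) ^ 2
           + (PySem.List.pyGetD s l 0 - PySem.List.pyGetD s r 0) ^ 2)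
  else ans + (PySem.List.pyGetD s r 0 - pre) ^ 2
termination_by (r - l).toNat
decreasing_by omega

def maxCaloriesBurnt (heights : List Int) : Int :=
  let s := PySem.List.sorted heights (fun x => x) false
  pvLoopA s 0 0 ((s.length : Int) - 1) 0

-- ===== PORT B =====
def maxCaloriesBurnt_alt (heights : List Int) : Int :=
  let s := PySem.List.sorted heights (fun x => x) false
  let n : Int := (s.length : Int)
  let total := 2 * (s.foldl (fun a x => a + x * x) 0)
      - (PySem.List.pyGetD s (PySem.Int.floordiv (n - 1) 2) 0) ^ 2
  let cross := (PySem.List.pyRange 0 (PySem.Int.floordiv n 2) 1).foldl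
      (fun a j => a + PySem.List.pyGetD s j 0 * PySem.List.pyGetD s (n - 1 - j) 0) 0
  let cross2 := cross + (PySem.List.pyRange 0 (PySem.Int.floordiv (n - 1) 2) 1).foldl
      (fun a j => a + PySem.List.pyGetD s j 0 * PySem.List.pyGetD s (n - 2 - j) 0) 0
  total - 2 * cross2

-- ===== PRECONDITION & SPEC =====
-- Pre_ excludes only the empty list, on which A (heights[-1]) and B raise IndexError.
def Pre_maxCaloriesBurnt (heights : List Int) : Prop := heights ≠ []
instance (heights : List Int) : Decidable (Pre_maxCaloriesBurnt heights) := by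
  unfold Pre_maxCaloriesBurnt; infer_instance
def pvWitness_maxCaloriesBurnt : List Int := [3, 1, 2]

def Spec_maxCaloriesBurnt (heights : List Int) (out : Int) : Prop := out = maxCaloriesBurnt_alt heights
instance (heights : List Int) (out : Int) : Decidable (Spec_maxCaloriesBurnt heights out) := by
  unfold Spec_maxCaloriesBurnt; infer_instance

-- ===== CLAIM (what is proved, stated in full; the proofs are below) =====
def Claim_equal_maxCaloriesBurnt : Prop := ∀ (heights : List Int), Dom_maxCaloriesBurnt heights → Pre_maxCaloriesBurnt heights → Spec_maxCaloriesBurnt heights (maxCaloriesBurnt heights)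

-- ===== LEMMAS AND PROOFS =====

-- sum of squares of s[l..r]
def pvSS (s : List Int) (l r : Nat) : Int :=
  ((List.range (r + 1 - l)).map (fun t => s.getD (l + t) 0 * s.getD (l + t) 0)).sum
-- "downward" cross products s[l+t]*s[r-t]
def pvCA (s : List Int) (l r : Nat) : Int :=
  ((List.range ((r - l + 1) / 2)).map (fun t => s.getD (l + t) 0 * s.getD (r - t) 0)).sum
-- "upward" cross products s[l+t]*s[r-1-t]
def pvCB (s : List Int) (l r : Nat) : Int :=
  ((List.range ((r - l) / 2)).map (fun t => s.getD (l + t) 0 * s.getD (r - 1 - t) 0)).sum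

lemma pvSS_step (s : List Int) (l r : Nat) (h : l < r) :
    pvSS s l r = s.getD l 0 * s.getD l 0 + s.getD r 0 * s.getD r 0 + pvSS s (l + 1) (r - 1) := by
  unfold pvSS
  have hk : r + 1 - l = (r - 1 + 1 - (l + 1)) + 1 + 1 := by omega
  rw [hk, List.range_succ, List.range_succ_eq_map]
  simp only [List.map_append, List.map_cons, List.map_map, List.sum_append, List.sum_cons]
  have hmap : ∀ t : Nat,
      ((fun t => s.getD (l + t) 0 * s.getD (l + t) 0) ∘ (fun t => t + 1)) t
        = (fun t => s.getD (l + 1 + t) 0 * s.getD (l + 1 + t) 0) t := by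
    intro t; simp only [Function.comp]
    have : l + (t + 1) = l + 1 + t := by omega
    rw [this]
  rw [List.map_congr_left fun t _ => hmap t]
  have hlast : l + (r - 1 + 1 - (l + 1) + 1) = r := by omega
  rw [hlast]
  simp
  ring

lemma pvCA_step (s : List Int) (l r : Nat) (h : l < r) :
    pvCA s l r = s.getD l 0 * s.getD r 0 + pvCA s (l + 1) (r - 1) := by
  unfold pvCA
  have hk : (r - l + 1) / 2 = ((r - 1 - (l + 1) + 1) / 2) + 1 := by omega
  rw [hk, List.range_succ_eq_map]
  simp only [List.map_cons, List.map_map, List.sum_cons]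
  have hmap : ∀ t : Nat,
      ((fun t => s.getD (l + t) 0 * s.getD (r - t) 0) ∘ (fun t => t + 1)) t
        = (fun t => s.getD (l + 1 + t) 0 * s.getD (r - 1 - t) 0) t := by
    intro t; simp only [Function.comp]
    have e1 : l + (t + 1) = l + 1 + t := by omega
    have e2 : r - (t + 1) = r - 1 - t := by omega
    rw [e1, e2]
  rw [List.map_congr_left fun t _ => hmap t]
  simp

lemma pvCB_step (s : List Int) (l r : Nat) (h : l + 1 < r) :
    pvCB s l r = s.getD l 0 * s.getD (r - 1) 0 + pvCB s (l + 1) (r - 1) := by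
  unfold pvCB
  have hk : (r - l) / 2 = ((r - 1 - (l + 1)) / 2) + 1 := by omega
  rw [hk, List.range_succ_eq_map]
  simp only [List.map_cons, List.map_map, List.sum_cons]
  have hmap : ∀ t : Nat,
      ((fun t => s.getD (l + t) 0 * s.getD (r - 1 - t) 0) ∘ (fun t => t + 1)) t
        = (fun t => s.getD (l + 1 + t) 0 * s.getD (r - 1 - 1 - t) 0) t := by
    intro t; simp only [Function.comp]
    have e1 : l + (t + 1) = l + 1 + t := by omega
    have e2 : r - 1 - (t + 1) = r - 1 - 1 - t := by omega
    rw [e1, e2]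
  rw [List.map_congr_left fun t _ => hmap t]
  simp

-- the closed form of A's loop on an interval [l, r]
lemma pvLoopA_closed (s : List Int) (l r : Nat) (hlr : l ≤ r) (pre ans : Int) :
    pvLoopA s pre (l : Int) (r : Int) ans
      = ans + pre ^ 2 - 2 * pre * s.getD r 0 + 2 * pvSS s l r
        - s.getD (l + (r - l) / 2) 0 * s.getD (l + (r - l) / 2) 0
        - 2 * (pvCA s l r + pvCB s l r) := by
  unfold pvLoopA
  by_cases h : l < r
  · rw [if_pos (by exact_mod_cast h)]
    have h1 : ((l : Int) + 1) = ((l + 1 : Nat) : Int) := by push_cast; ring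
    have hr1 : ((r : Int) - 1) = ((r - 1 : Nat) : Int) := by
      have : 1 ≤ r := by omega
      push_cast [this]; ring
    by_cases h2 : l + 1 < r
    · -- interval of length ≥ 3
      rw [h1, hr1, pvLoopA_closed s (l + 1) (r - 1) (by omega)]
      rw [pvSS_step s l r h, pvCA_step s l r h, pvCB_step s l r h2]
      simp only [PySem.List.pyGetD_natCast]
      have hm : l + 1 + (r - 1 - (l + 1)) / 2 = l + (r - l) / 2 := by omega
      have hr2 : r - 1 - 1 = r - 2 := by omega
      rw [hm]
      ring
    · -- two-element interval: r = l + 1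
      have hre : r = l + 1 := by omega
      subst hre
      rw [h1, hr1]
      have hbase : l + 1 - 1 = l := by omega
      rw [hbase]
      -- inner call has l' = r' = l... actually l' = l+1, r' = l, so l' > r': unfold once more
      unfold pvLoopA
      rw [if_neg (by push_cast; omega)]
      simp only [PySem.List.pyGetD_natCast]
      unfold pvSS pvCA pvCB
      have e1 : l + 1 + 1 - l = 2 := by omega
      have e2 : (l + 1 - l + 1) / 2 = 1 := by omega
      have e3 : (l + 1 - l) / 2 = 0 := by omega
      rw [e1, e2, e3]
      simp [List.range_succ]
      ring
  · -- l = r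
    have hre : l = r := by omega
    subst hre
    rw [if_neg (by exact_mod_cast h)]
    simp only [PySem.List.pyGetD_natCast]
    unfold pvSS pvCA pvCB
    have e1 : l + 1 - l = 1 := by omega
    have e2 : (l - l + 1) / 2 = 0 := by omega
    have e3 : (l - l) / 2 = 0 := by omega
    rw [e1, e2, e3]
    simp [List.range_succ]
    ring
termination_by r - l

-- a list's sum of squares as an index sum
lemma pvFoldSq (s : List Int) (hlen : 1 ≤ s.length) :
    s.foldl (fun a x => a + x * x) 0 = pvSS s 0 (s.length - 1) := by
  rw [PySem.List.foldl_add s (fun x => x * x) 0, zero_add]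
  unfold pvSS
  congr 1
  apply List.ext_getElem
  · simp; omega
  · intro i h1 h2
    simp only [List.getElem_map, List.getElem_range, Nat.zero_add]
    have hi : i < s.length := by simpa using h1
    rw [List.getD_eq_getElem s 0 (by omega)]

-- cross-product folds of B as pvCA / pvCB
lemma pvCrossA (s : List Int) :
    (PySem.List.pyRange 0 (PySem.Int.floordiv (s.length : Int) 2) 1).foldl
        (fun a j => a + PySem.List.pyGetD s j 0 * PySem.List.pyGetD s ((s.length : Int) - 1 - j) 0) 0
      = pvCA s 0 (s.length - 1) := by
  rw [PySem.List.foldl_add, zero_add]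
  have hf : PySem.Int.floordiv ((s.length : Nat) : Int) 2 = ((s.length / 2 : Nat) : Int) := by
    exact_mod_cast PySem.Int.floordiv_natCast s.length 2
  rw [hf, PySem.List.pyRange_one]
  simp only [sub_zero, Int.toNat_natCast, List.map_map]
  unfold pvCA
  have hc : (s.length - 1 - 0 + 1) / 2 = s.length / 2 := by omega
  rw [hc]
  refine congrArg List.sum (List.map_congr_left ?_)
  intro k hk
  rw [List.mem_range] at hk
  simp only [Function.comp, zero_add]
  have hcast : ((s.length : Int) - 1 - (k : Int)) = ((s.length - 1 - k : Nat) : Int) := by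
    omega
  rw [hcast, PySem.List.pyGetD_natCast, PySem.List.pyGetD_natCast]

lemma pvCrossB (s : List Int) (hlen : 1 ≤ s.length) :
    (PySem.List.pyRange 0 (PySem.Int.floordiv ((s.length : Int) - 1) 2) 1).foldl
        (fun a j => a + PySem.List.pyGetD s j 0 * PySem.List.pyGetD s ((s.length : Int) - 2 - j) 0) 0
      = pvCB s 0 (s.length - 1) := by
  rw [PySem.List.foldl_add, zero_add]
  have hc1 : ((s.length : Int) - 1) = ((s.length - 1 : Nat) : Int) := by push_cast [hlen]; ring
  have hf : PySem.Int.floordiv (((s.length - 1 : Nat)) : Int) 2 = (((s.length - 1) / 2 : Nat) : Int) := by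
    exact_mod_cast PySem.Int.floordiv_natCast (s.length - 1) 2
  rw [hc1, hf, PySem.List.pyRange_one]
  simp only [sub_zero, Int.toNat_natCast, List.map_map]
  unfold pvCB
  have hc : (s.length - 1 - 0) / 2 = (s.length - 1) / 2 := by omega
  rw [hc]
  refine congrArg List.sum (List.map_congr_left ?_)
  intro k hk
  rw [List.mem_range] at hk
  simp only [Function.comp, zero_add]
  have hk2 : k + 2 ≤ s.length := by omega
  have hcast : ((s.length : Int) - 2 - (k : Int)) = ((s.length - 1 - 1 - k : Nat) : Int) := by
    omega
  rw [hcast, PySem.List.pyGetD_natCast, PySem.List.pyGetD_natCast]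

-- ===== VERDICT (by name: the statement is the Claim_ definition above) =====
theorem maxCaloriesBurnt_spec : Claim_equal_maxCaloriesBurnt := by
  intro heights _ hpre
  unfold Spec_maxCaloriesBurnt maxCaloriesBurnt maxCaloriesBurnt_alt
  set s := PySem.List.sorted heights (fun x => x) false with hs
  have hlen : 1 ≤ s.length := by
    have hl : s.length = heights.length := PySem.List.length_sorted heights (fun x => x) false
    cases heights with
    | nil => exact absurd rfl hpre
    | cons a t => rw [hl]; simp
  simp only []
  have hcast : ((s.length : Int) - 1) = ((s.length - 1 : Nat) : Int) := by push_cast [hlen]; ring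
  have hA := pvLoopA_closed s 0 (s.length - 1) (by omega) 0 0
  rw [Nat.cast_zero] at hA
  have hf : PySem.Int.floordiv ((s.length : Int) - 1) 2 = (((s.length - 1) / 2 : Nat) : Int) := by
    rw [hcast]; exact_mod_cast PySem.Int.floordiv_natCast (s.length - 1) 2
  rw [pvFoldSq s hlen, pvCrossA, pvCrossB s hlen, hf, PySem.List.pyGetD_natCast, hcast, hA]
  have hm : 0 + (s.length - 1 - 0) / 2 = (s.length - 1) / 2 := by omega
  rw [hm]
  ring
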